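-- pv_equiv track=rewrite | github.com/pypi-data/pypi-mirror-402 | packages/reveal-cli/reveal_cli-0.44.2.tar.gz/reveal_cli-0.44.2/reveal/adapters/mysql/adapter.py | _calculate_check_summary
-- ===== SOURCE A (Python) =====
-- from typing import Dict, Any, List, Optional
--
-- def _calculate_check_summary(checks: List[Dict[str, Any]]) -> tuple:
--     """Calculate summary and overall status from checks.
--
--     Args:
--         checks: List of check result dicts
--
--     Returns:
--         Tuple of (overall_status, exit_code, summary_dict)
--     """
--     total = len(checks)
--     passed = sum(1 for c in checks if c['status'] == 'pass')
--     warnings = sum(1 for c in checks if c['status'] == 'warning')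
--     failures = sum(1 for c in checks if c['status'] == 'failure')
--
--     # Determine overall status and exit code
--     if failures > 0:
--         overall_status = 'failure'
--         exit_code = 2
--     elif warnings > 0:
--         overall_status = 'warning'
--         exit_code = 1
--     else:
--         overall_status = 'pass'
--         exit_code = 0
--
--     summary = {
--         'total': total,
--         'passed': passed,
--         'warnings': warnings,
--         'failures': failures
--     }
--
--     return overall_status, exit_code, summary
-- ===== SOURCE B (Python) =====
-- def _calculate_check_summary(checks):
--     """Single pass over checks maintaining three counters instead of three scans."""
--     passed = 0
--     warnings = 0
--     failures = 0
--     for c in checks: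
--         s = c['status']
--         if s == 'pass':
--             passed += 1
--         elif s == 'warning':
--             warnings += 1
--         elif s == 'failure':
--             failures += 1
--     if failures > 0:
--         overall_status = 'failure'
--         exit_code = 2
--     elif warnings > 0:
--         overall_status = 'warning'
--         exit_code = 1
--     else:
--         overall_status = 'pass'
--         exit_code = 0
--     return overall_status, exit_code, {
--         'total': len(checks),
--         'passed': passed,
--         'warnings': warnings,
--         'failures': failures,
--     }
-- ===== Notes on version B (the rewrite author's own statement) =====
-- stated objective: alternative
-- what changed: Replaces three separate sum-comprehension scans of the checks list with a single pass that reads each status once and maintains three counters via if/elif.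
import Mathlib
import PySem

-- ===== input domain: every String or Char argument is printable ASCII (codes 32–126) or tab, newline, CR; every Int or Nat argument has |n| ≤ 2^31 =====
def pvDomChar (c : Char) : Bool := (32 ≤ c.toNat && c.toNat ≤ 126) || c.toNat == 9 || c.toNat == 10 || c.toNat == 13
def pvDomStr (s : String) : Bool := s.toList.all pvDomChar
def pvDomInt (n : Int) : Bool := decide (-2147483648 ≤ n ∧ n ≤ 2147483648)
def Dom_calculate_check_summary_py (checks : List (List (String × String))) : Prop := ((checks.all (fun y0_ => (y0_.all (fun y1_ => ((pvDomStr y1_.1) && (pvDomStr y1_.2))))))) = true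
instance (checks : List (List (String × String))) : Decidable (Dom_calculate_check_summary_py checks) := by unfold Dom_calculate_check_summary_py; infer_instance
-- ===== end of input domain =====

-- dict lookup c['status']: first match in the association list (none = KeyError)
def pvStatus? (c : List (String × String)) : Option String :=
  (c.find? (fun kv => kv.1 == "status")).map (·.2)

-- B makes a single pass keeping three counters instead of A's three sum-comprehension scans; return value unchanged.

-- ===== PORT A =====
def calculate_check_summary_py (checks : List (List (String × String))) : String × Int × (List (String × Int)) :=
  let total : Int := checks.length
  let passed : Int := (checks.map (fun c => if pvStatus? c = some "pass" then (1 : Int) else 0)).sum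
  let warnings : Int := (checks.map (fun c => if pvStatus? c = some "warning" then (1 : Int) else 0)).sum
  let failures : Int := (checks.map (fun c => if pvStatus? c = some "failure" then (1 : Int) else 0)).sum
  let osec : String × Int :=
    if failures > 0 then ("failure", 2)
    else if warnings > 0 then ("warning", 1)
    else ("pass", 0)
  (osec.1, osec.2, [("total", total), ("passed", passed), ("warnings", warnings), ("failures", failures)])

-- ===== PORT B =====
def pvAltStep (acc : Int × Int × Int) (c : List (String × String)) : Int × Int × Int :=
  let s := pvStatus? c
  if s = some "pass" then (acc.1 + 1, acc.2.1, acc.2.2)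
  else if s = some "warning" then (acc.1, acc.2.1 + 1, acc.2.2)
  else if s = some "failure" then (acc.1, acc.2.1, acc.2.2 + 1)
  else acc

def calculate_check_summary_py_alt (checks : List (List (String × String))) : String × Int × (List (String × Int)) :=
  let pwf := checks.foldl pvAltStep (0, 0, 0)
  let osec : String × Int :=
    if pwf.2.2 > 0 then ("failure", 2)
    else if pwf.2.1 > 0 then ("warning", 1)
    else ("pass", 0)
  (osec.1, osec.2, [("total", (checks.length : Int)), ("passed", pwf.1), ("warnings", pwf.2.1), ("failures", pwf.2.2)])

-- ===== PRECONDITION & SPEC =====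
-- Pre_ excludes checks lacking a 'status' key, on which the Python A (and B) raise KeyError.
def Pre_calculate_check_summary_py (checks : List (List (String × String))) : Prop :=
  checks.all (fun c => c.any (fun kv => kv.1 == "status")) = true
instance (checks : List (List (String × String))) : Decidable (Pre_calculate_check_summary_py checks) := by unfold Pre_calculate_check_summary_py; infer_instance
def pvWitness_calculate_check_summary_py : (List (List (String × String))) := [[("status", "pass")], [("status", "failure")]]

def Spec_calculate_check_summary_py (checks : List (List (String × String))) (out : String × Int × (List (String × Int))) : Prop := out = calculate_check_summary_py_alt checks
instance (checks : List (List (String × String))) (out : String × Int × (List (String × Int))) : Decidable (Spec_calculate_check_summary_py checks out) := by unfold Spec_calculate_check_summary_py; infer_instance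

-- ===== CLAIM (what is proved, stated in full; the proofs are below) =====
def Claim_equal_calculate_check_summary_py : Prop := ∀ (checks : List (List (String × String))), Dom_calculate_check_summary_py checks → Pre_calculate_check_summary_py checks → Spec_calculate_check_summary_py checks (calculate_check_summary_py checks)

-- ===== LEMMAS AND PROOFS =====

-- The single-pass fold computes exactly A's three 0/1-sums, shifted by the start accumulator.
lemma pvAltStep_foldl (checks : List (List (String × String))) (p w f : Int) :
    checks.foldl pvAltStep (p, w, f) =
      (p + (checks.map (fun c => if pvStatus? c = some "pass" then (1 : Int) else 0)).sum,
       w + (checks.map (fun c => if pvStatus? c = some "warning" then (1 : Int) else 0)).sum,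
       f + (checks.map (fun c => if pvStatus? c = some "failure" then (1 : Int) else 0)).sum) := by
  induction checks generalizing p w f with
  | nil => simp
  | cons c cs ih =>
    simp only [List.foldl_cons, List.map_cons, List.sum_cons, pvAltStep]
    split_ifs <;> simp_all [Prod.ext_iff] <;> ring

theorem pv_eq (checks : List (List (String × String))) :
    calculate_check_summary_py checks = calculate_check_summary_py_alt checks := by
  simp only [calculate_check_summary_py, calculate_check_summary_py_alt, pvAltStep_foldl]
  simp

-- ===== VERDICT (by name: the statement is the Claim_ definition above) =====
theorem calculate_check_summary_py_spec : Claim_equal_calculate_check_summary_py := by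
  intro checks _ _
  exact pv_eq checks
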